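-- pv_equiv track=rewrite | github.com/LeoSestreV/Multi-Strategy-RAG-Chunker | Strategy_FixedSize/chunking.py | _find_sentence_break
-- ===== SOURCE A (Python) =====
-- def _find_sentence_break(text: str, max_len: int) -> int:
--     """Find the best split position at a sentence boundary before max_len."""
--     if len(text) <= max_len:
--         return len(text)
--
--     # Search backwards from max_len for the last sentence-ending punctuation
--     search_region = text[:max_len]
--     best_pos = -1
--     for punct in '.!?':
--         pos = search_region.rfind(punct)
--         if pos > best_pos:
--             best_pos = pos
--
--     # If found a sentence boundary, split right after the punctuation
--     if best_pos > 0: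
--         return best_pos + 1
--
--     # Fallback: split at last space to avoid breaking words
--     space_pos = text.rfind(" ", 0, max_len)
--     if space_pos > 0:
--         return space_pos
--
--     return max_len
-- ===== SOURCE B (Python) =====
-- def _find_sentence_break(text: str, max_len: int) -> int:
--     """Find the best split position at a sentence boundary before max_len."""
--     if len(text) <= max_len:
--         return len(text)
--
--     # One backward pass over the search region: the first '.'/'!'/'?' met is the
--     # last sentence boundary; remember the first (i.e. rightmost) space on the way
--     # so no second search is needed for the fallback.
--     region = text[:max_len]
--     space_pos = -1
--     for i in range(len(region) - 1, -1, -1):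
--         c = region[i]
--         if c in '.!?':
--             if i > 0:
--                 return i + 1
--             break
--         if space_pos == -1 and c == ' ':
--             space_pos = i
--
--     if space_pos > 0:
--         return space_pos
--     return max_len
-- ===== Notes on version B (the rewrite author's own statement) =====
-- stated objective: alternative
-- what changed: Replaces the three C-level rfind calls plus max and the separate rfind for the space fallback by a single backward scan of the search region that returns at the first sentence punctuation and remembers the rightmost space on the way.
import Mathlib
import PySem

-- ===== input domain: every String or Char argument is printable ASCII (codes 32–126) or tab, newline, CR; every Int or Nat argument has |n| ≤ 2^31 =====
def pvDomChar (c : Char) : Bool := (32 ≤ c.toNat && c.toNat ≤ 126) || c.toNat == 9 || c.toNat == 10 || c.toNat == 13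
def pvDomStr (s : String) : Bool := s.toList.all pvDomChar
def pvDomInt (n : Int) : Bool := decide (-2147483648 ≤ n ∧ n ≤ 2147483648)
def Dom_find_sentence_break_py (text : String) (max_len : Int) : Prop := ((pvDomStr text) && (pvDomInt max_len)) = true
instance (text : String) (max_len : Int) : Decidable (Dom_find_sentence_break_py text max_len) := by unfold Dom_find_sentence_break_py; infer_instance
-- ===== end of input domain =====

-- B replaces A's three rfind calls plus max and the separate space rfind by one
-- backward scan of the region (objective: alternative single-pass decomposition).

-- ===== PORT A =====
-- the loop `for punct in '.!?': …` accumulating best_pos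
def aBestLoop (search_region : List Char) : Int :=
  ['.', '!', '?'].foldl (fun best_pos punct =>
    let pos := PySem.Chars.rfind search_region [punct]
    if pos > best_pos then pos else best_pos) (-1)

def find_sentence_break_py (text : String) (max_len : Int) : Int :=
  let s := text.toList
  if (s.length : Int) ≤ max_len then (s.length : Int)
  else
    let search_region := PySem.Chars.slice s none (some max_len)
    let best_pos := aBestLoop search_region
    if best_pos > 0 then best_pos + 1
    else
      let space_pos := PySem.Chars.rfindFrom s [' '] 0 (some max_len)
      if space_pos > 0 then space_pos
      else max_len

-- ===== PORT B =====
def bIsPunct (c : Char) : Bool := c == '.' || c == '!' || c == '?'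

-- the backward `for i in range(len(region)-1, -1, -1)` loop: walks the reversed
-- region with index i; `some r` is an early `return r`, otherwise carries space_pos
def bScan : List Char → Int → Int → Option Int × Int
  | [], _, space_pos => (none, space_pos)
  | c :: rest, i, space_pos =>
    if bIsPunct c then
      if i > 0 then (some (i + 1), space_pos) else (none, space_pos)
    else
      bScan rest (i - 1) (if space_pos = -1 ∧ c = ' ' then i else space_pos)

def find_sentence_break_py_alt (text : String) (max_len : Int) : Int :=
  let s := text.toList
  if (s.length : Int) ≤ max_len then (s.length : Int)
  else
    let region := PySem.Chars.slice s none (some max_len)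
    match bScan region.reverse ((region.length : Int) - 1) (-1) with
    | (some r, _) => r
    | (none, space_pos) => if space_pos > 0 then space_pos else max_len

-- ===== PRECONDITION & SPEC =====
def Spec_find_sentence_break_py (text : String) (max_len : Int) (out : Int) : Prop := out = find_sentence_break_py_alt text max_len
instance (text : String) (max_len : Int) (out : Int) : Decidable (Spec_find_sentence_break_py text max_len out) := by unfold Spec_find_sentence_break_py; infer_instance

-- ===== CLAIM (what is proved, stated in full; the proofs are below) =====
def Claim_equal_find_sentence_break_py : Prop := ∀ (text : String) (max_len : Int), Dom_find_sentence_break_py text max_len → Spec_find_sentence_break_py text max_len (find_sentence_break_py text max_len)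

-- ===== LEMMAS AND PROOFS =====

theorem go_zero (s sub : List Char) :
    PySem.Chars.rfind.go s sub 0 = if sub.isPrefixOf s then (0 : Int) else -1 := rfl

theorem go_succ (s sub : List Char) (j : Nat) :
    PySem.Chars.rfind.go s sub (j + 1)
      = if sub.isPrefixOf (s.drop (j + 1)) then ((j + 1 : Nat) : Int)
        else PySem.Chars.rfind.go s sub j := rfl

theorem go_le (s sub : List Char) (k : Nat) : PySem.Chars.rfind.go s sub k ≤ (k : Int) := by
  induction k with
  | zero => rw [go_zero]; split <;> omega
  | succ j ih => rw [go_succ]; split <;> push_cast at * <;> omega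

theorem rfind_le (l : List Char) (p : Char) : PySem.Chars.rfind l [p] ≤ (l.length : Int) := by
  unfold PySem.Chars.rfind; exact go_le l [p] l.length

theorem neg_one_le_go (s sub : List Char) (k : Nat) : -1 ≤ PySem.Chars.rfind.go s sub k := by
  induction k with
  | zero => rw [go_zero]; split <;> omega
  | succ j ih =>
    rw [go_succ]; split
    all_goals first
      | exact ih
      | (push_cast; omega)

theorem neg_one_le_rfind (l : List Char) (p : Char) : -1 ≤ PySem.Chars.rfind l [p] := by
  unfold PySem.Chars.rfind; exact neg_one_le_go l [p] l.length

theorem go_append (l : List Char) (c p : Char) (k : Nat) (hk : k < l.length) :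
    PySem.Chars.rfind.go (l ++ [c]) [p] k = PySem.Chars.rfind.go l [p] k := by
  induction k with
  | zero =>
    cases l with
    | nil => simp at hk
    | cons a t => rw [go_zero, go_zero]; simp [List.isPrefixOf]
  | succ j ih =>
    rw [go_succ, go_succ]
    have hd : (l ++ [c]).drop (j + 1) = l.drop (j + 1) ++ [c] :=
      List.drop_append_of_le_length (by omega)
    have hne : l.drop (j + 1) ≠ [] := by
      intro h
      have := List.length_drop (i := j + 1) (l := l)
      rw [h] at this; simp at this; omega
    obtain ⟨a, t, hat⟩ := List.exists_cons_of_ne_nil hne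
    rw [hd, hat]
    simp [List.isPrefixOf, ih (by omega)]

theorem rfind_snoc (l : List Char) (c p : Char) :
    PySem.Chars.rfind (l ++ [c]) [p] = if c = p then (l.length : Int) else PySem.Chars.rfind l [p] := by
  unfold PySem.Chars.rfind
  cases l with
  | nil =>
    have h1 : ([] ++ [c] : List Char).length = 0 + 1 := by simp
    have h0 : ([] : List Char).length = 0 := rfl
    rw [h1, h0, go_succ, go_zero, go_zero]
    by_cases hcp : c = p
    · subst hcp; simp [List.isPrefixOf]
    · have : (p == c) = false := by simp; exact fun h => hcp h.symm
      simp [List.isPrefixOf, this, hcp]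
  | cons a t =>
    have h1 : ((a :: t) ++ [c]).length = (t.length + 1) + 1 := by simp
    have h2 : (a :: t).length = t.length + 1 := by simp
    rw [h1, h2, go_succ, go_succ, go_succ]
    have hd1 : ((a :: t) ++ [c]).drop (t.length + 1 + 1) = [] := by
      apply List.drop_eq_nil_of_le; simp
    have hd2 : ((a :: t) ++ [c]).drop (t.length + 1) = [c] := by
      rw [List.drop_append_of_le_length (by simp)]; simp
    have hd3 : (a :: t).drop (t.length + 1) = [] := by simp
    rw [hd1, hd2, hd3]
    by_cases hcp : c = p
    · subst hcp; simp [List.isPrefixOf]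
    · have hpc : (p == c) = false := by simp; exact fun h => hcp h.symm
      have gap : PySem.Chars.rfind.go (a :: (t ++ [c])) [p] t.length
          = PySem.Chars.rfind.go (a :: t) [p] t.length := by
        have := go_append (a :: t) c p t.length (by simp)
        simpa using this
      simp [List.isPrefixOf, hpc, hcp, gap]

theorem aBest_snoc (l : List Char) (c : Char) :
    aBestLoop (l ++ [c]) = if bIsPunct c then (l.length : Int) else aBestLoop l := by
  have b1 := rfind_le l '.'
  have b2 := rfind_le l '!'
  have b3 := rfind_le l '?'
  have n1 := neg_one_le_rfind l '.'
  have n2 := neg_one_le_rfind l '!'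
  have n3 := neg_one_le_rfind l '?'
  simp only [aBestLoop, List.foldl, rfind_snoc, bIsPunct]
  by_cases h1 : c = '.'
  · simp [h1]; split_ifs <;> omega
  · by_cases h2 : c = '!'
    · simp [h2]; split_ifs <;> omega
    · by_cases h3 : c = '?'
      · simp [h3]; split_ifs <;> omega
      · simp [h1, h2, h3]

theorem bIsPunct_ne_space (c : Char) (h : bIsPunct c = true) : c ≠ ' ' := by
  intro hc; subst hc; simp [bIsPunct] at h

theorem bScan_spec (l : List Char) (sp : Int) :
    (bScan l.reverse ((l.length : Int) - 1) sp).1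
      = (if aBestLoop l > 0 then some (aBestLoop l + 1) else none)
    ∧ ((bScan l.reverse ((l.length : Int) - 1) sp).1 = none →
       (bScan l.reverse ((l.length : Int) - 1) sp).2
         = if sp = -1 then PySem.Chars.rfind l [' '] else sp) := by
  induction l using List.reverseRecOn generalizing sp with
  | nil =>
    constructor
    · simp [bScan, aBestLoop, PySem.Chars.rfind, go_zero, List.isPrefixOf]
    · intro _
      simp only [List.reverse_nil, bScan]
      have hr : PySem.Chars.rfind ([] : List Char) [' '] = -1 := by decide
      rw [hr]
      split_ifs with h
      · exact h
      · rfl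
  | append_singleton l c ih =>
    have hrev : (l ++ [c]).reverse = c :: l.reverse := by simp
    have hlen : ((l ++ [c]).length : Int) - 1 = (l.length : Int) := by simp
    rw [hrev, hlen]
    by_cases hp : bIsPunct c
    · -- punctuation: early return at index i = l.length if it is positive
      have ha : aBestLoop (l ++ [c]) = (l.length : Int) := by rw [aBest_snoc, if_pos hp]
      by_cases hl : l = []
      · subst hl
        have hr : PySem.Chars.rfind ([] ++ [c]) [' '] = -1 := by
          rw [rfind_snoc, if_neg (bIsPunct_ne_space c hp)]; decide
        have ha1 : aBestLoop [c] = 0 := by simpa using ha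
        constructor
        · simp [bScan, hp, ha1]
        · intro _
          have hb2 : (bScan (c :: ([] : List Char).reverse)
              ((([] : List Char).length : Int)) sp).2 = sp := by
            simp [bScan, hp]
          rw [hb2, hr]
          split_ifs with h
          · exact h
          · rfl
      · have hposn : 0 < l.length := List.length_pos_of_ne_nil hl
        constructor
        · simp [bScan, hp, ha, hposn]
        · intro hnone
          exfalso
          simp [bScan, hp, hposn] at hnone
    · -- not punctuation: record the space (if first) and continue leftwards
      have ha : aBestLoop (l ++ [c]) = aBestLoop l := by rw [aBest_snoc, if_neg hp]
      have hr : PySem.Chars.rfind (l ++ [c]) [' ']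
          = if c = ' ' then (l.length : Int) else PySem.Chars.rfind l [' '] := rfind_snoc l c ' '
      have hstep : bScan (c :: l.reverse) (l.length : Int) sp
          = bScan l.reverse ((l.length : Int) - 1)
              (if sp = -1 ∧ c = ' ' then (l.length : Int) else sp) := by
        simp [bScan, hp]
      rw [hstep, ha, hr]
      by_cases hs : sp = -1
      · by_cases hc : c = ' '
        · rw [if_pos ⟨hs, hc⟩]
          obtain ⟨ih1, ih2⟩ := ih (l.length : Int)
          refine ⟨ih1, fun hnone => ?_⟩
          rw [ih2 hnone, if_pos hs, if_pos hc]
          rw [if_neg (by omega : ¬ ((l.length : Int) = -1))]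
        · rw [if_neg (by exact fun h => hc h.2)]
          obtain ⟨ih1, ih2⟩ := ih sp
          refine ⟨ih1, fun hnone => ?_⟩
          rw [ih2 hnone, if_pos hs, if_pos hs, if_neg hc]
      · rw [if_neg (by exact fun h => hs h.1)]
        obtain ⟨ih1, ih2⟩ := ih sp
        refine ⟨ih1, fun hnone => ?_⟩
        rw [ih2 hnone, if_neg hs, if_neg hs]

theorem rfindFrom_zero_some (s sub : List Char) (b : Int) :
    PySem.Chars.rfindFrom s sub 0 (some b)
      = PySem.Chars.rfind (PySem.Chars.slice s none (some b)) sub := by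
  have hcl : ∀ (X : List Char),
      (if PySem.Chars.rfind X sub = -1 then (-1 : Int) else PySem.Chars.rfind X sub)
        = PySem.Chars.rfind X sub := by
    intro X; split_ifs with h
    · omega
    · rfl
  rw [PySem.Chars.slice_eq_listSlice]
  simp only [PySem.Chars.rfindFrom, PySem.List.slice, PySem.List.clampIdx,
    List.drop_zero, Nat.sub_zero]
  norm_num
  simp only [hcl]
  split_ifs <;>
    first
      | rfl
      | omega
      | (congr 2 <;> first | rfl | omega)

-- ===== VERDICT (by name: the statement is the Claim_ definition above) =====
theorem find_sentence_break_py_spec : Claim_equal_find_sentence_break_py := by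
  intro text max_len _
  unfold Spec_find_sentence_break_py
  simp only [find_sentence_break_py, find_sentence_break_py_alt]
  by_cases hg : ((text.toList.length : Int) ≤ max_len)
  · rw [if_pos hg, if_pos hg]
  · rw [if_neg hg, if_neg hg]
    obtain ⟨h1, h2⟩ := bScan_spec (PySem.Chars.slice text.toList none (some max_len)) (-1)
    rcases hres : bScan (PySem.Chars.slice text.toList none (some max_len)).reverse
        (((PySem.Chars.slice text.toList none (some max_len)).length : Int) - 1) (-1) with ⟨o, spv⟩
    rw [hres] at h1 h2
    simp only at h1 h2
    by_cases hb : aBestLoop (PySem.Chars.slice text.toList none (some max_len)) > 0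
    · rw [if_pos hb]
      rw [if_pos hb] at h1
      subst h1; rfl
    · rw [if_neg hb]
      rw [if_neg hb] at h1
      subst h1
      have hsp := h2 rfl
      rw [if_pos trivial] at hsp
      rw [rfindFrom_zero_some, ← hsp]
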